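-- pv_equiv track=rewrite | github.com/KooroshRZ/CTF-Writeups | TMU2021/Crypto/BabyEncoder/solve.py | decode3
-- ===== SOURCE A (Python) =====
-- def reverse(lst):
--     return [ele for ele in reversed(lst)]
--
-- def decode3(data):
--
--     first = ord('}')
--     size = len(data)
--     new1 = []
--
--     for i in range(size-1, -1, -1):
--
--         first = first ^ data[i]
--         new1.append(first)
--
--     new1 = reverse(new1)
--     new2 = []
--     for i in range(size):
--         new2.append(new1[(i+1)%size])
--
--     return new2
-- ===== SOURCE B (Python) =====
-- def decode3(data):
--     n = len(data)
--     total = 0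
--     for x in data:
--         total ^= x
--     suf = []
--     s = total
--     for x in data:
--         suf.append(s)
--         s ^= x
--     return [125 ^ suf[(i + 1) % n] for i in range(n)]
-- ===== Notes on version B (the rewrite author's own statement) =====
-- stated objective: simpler
-- what changed: Replaces the backward accumulation loop plus an explicit list reversal with an aggregate-then-forward decomposition: compute the total XOR once, build the suffix-XOR array in a single forward sweep, and emit 125 ^ suf[(i+1)%n] directly.
import Mathlib
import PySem

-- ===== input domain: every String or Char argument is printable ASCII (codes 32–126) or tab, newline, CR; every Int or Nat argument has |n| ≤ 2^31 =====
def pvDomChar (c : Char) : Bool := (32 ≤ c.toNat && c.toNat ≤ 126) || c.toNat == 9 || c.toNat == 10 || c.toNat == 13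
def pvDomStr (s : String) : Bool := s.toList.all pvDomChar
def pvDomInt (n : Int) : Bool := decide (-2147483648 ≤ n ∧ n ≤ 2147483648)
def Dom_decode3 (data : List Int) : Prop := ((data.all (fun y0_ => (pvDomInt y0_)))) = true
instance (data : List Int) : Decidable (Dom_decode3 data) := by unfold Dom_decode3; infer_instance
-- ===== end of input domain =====

-- B replaces A's backward XOR accumulation plus explicit list reversal with an
-- aggregate-then-forward decomposition (total XOR, then a forward suffix-XOR sweep); objective: simpler.


-- ===== PORT A =====
-- helper `reverse(lst)` = list(reversed(lst)) → List.reverse;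
-- data[i] and new1[(i+1)%size] are always in range where evaluated, so pyGetD is exact.
def decode3 (data : List Int) : List Int :=
  let size : Int := data.length
  let st :=
    (PySem.List.pyRange (size - 1) (-1) (-1)).foldl
      (fun (st : Int × List Int) i =>
        let f := PySem.Int.bxor st.1 (PySem.List.pyGetD data i 0)
        (f, st.2 ++ [f]))
      ((125 : Int), ([] : List Int))
  let new1 := st.2.reverse
  (PySem.List.pyRange 0 size 1).map
    (fun i => PySem.List.pyGetD new1 (PySem.Int.mod (i + 1) size) 0)

-- ===== PORT B =====
def decode3_alt (data : List Int) : List Int :=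
  let n : Int := data.length
  let total := data.foldl (fun s x => PySem.Int.bxor s x) 0
  let suf :=
    (data.foldl (fun (st : Int × List Int) x =>
        (PySem.Int.bxor st.1 x, st.2 ++ [st.1])) (total, ([] : List Int))).2
  (PySem.List.pyRange 0 n 1).map
    (fun i => PySem.Int.bxor 125 (PySem.List.pyGetD suf (PySem.Int.mod (i + 1) n) 0))

-- ===== PRECONDITION & SPEC =====
def Spec_decode3 (data : List Int) (out : List Int) : Prop := out = decode3_alt data
instance (data : List Int) (out : List Int) : Decidable (Spec_decode3 data out) := by unfold Spec_decode3; infer_instance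

-- ===== CLAIM (what is proved, stated in full; the proofs are below) =====
def Claim_equal_decode3 : Prop := ∀ (data : List Int), Dom_decode3 data → Spec_decode3 data (decode3 data)

-- ===== LEMMAS AND PROOFS =====

-- proof-only helpers: sufAux s l = B's suffix-XOR list; accXor c l = A's accumulation outputs
def sufAux : Int → List Int → List Int
  | _, [] => []
  | s, x :: xs => s :: sufAux (PySem.Int.bxor s x) xs

def accXor : Int → List Int → List Int
  | _, [] => []
  | c, x :: xs => PySem.Int.bxor c x :: accXor (PySem.Int.bxor c x) xs

theorem bxor_assoc (a b c : Int) :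
    PySem.Int.bxor (PySem.Int.bxor a b) c = PySem.Int.bxor a (PySem.Int.bxor b c) := by
  have h1 : ∀ n : Nat, ((1:Int) ≤ -(n:Int)) ↔ False := by intro n; simp; omega
  by_cases ha : 0 ≤ a <;> by_cases hb : 0 ≤ b <;> by_cases hc : 0 ≤ c <;>
    simp [PySem.Int.bxor, ha, hb, hc, h1, Nat.xor_assoc]

theorem bxor_cancel (a b : Int) : PySem.Int.bxor (PySem.Int.bxor a b) b = a := by
  rw [bxor_assoc, PySem.Int.bxor_self, PySem.Int.bxor_zero]

theorem foldl_bxor_pull (l : List Int) (a b : Int) :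
    l.foldl PySem.Int.bxor (PySem.Int.bxor a b) = PySem.Int.bxor a (l.foldl PySem.Int.bxor b) := by
  induction l generalizing b with
  | nil => rfl
  | cons x l ih => simp only [List.foldl_cons, bxor_assoc, ih]

theorem foldl_bxor_zero (l : List Int) (c : Int) :
    l.foldl PySem.Int.bxor c = PySem.Int.bxor c (l.foldl PySem.Int.bxor 0) := by
  have := foldl_bxor_pull l c 0
  rwa [PySem.Int.bxor_zero] at this

theorem foldl_bxor_reverse (l : List Int) :
    l.reverse.foldl PySem.Int.bxor 0 = l.foldl PySem.Int.bxor 0 := by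
  induction l with
  | nil => rfl
  | cons x l ih =>
    simp only [List.reverse_cons, List.foldl_append, List.foldl_cons, List.foldl_nil, ih]
    rw [foldl_bxor_zero l (PySem.Int.bxor 0 x), PySem.Int.bxor_comm 0 x, PySem.Int.bxor_zero,
      foldl_bxor_zero l 0, PySem.Int.bxor_comm 0 (l.foldl PySem.Int.bxor 0), PySem.Int.bxor_zero,
      PySem.Int.bxor_comm]

theorem sufAux_length (s : Int) (l : List Int) : (sufAux s l).length = l.length := by
  induction l generalizing s with
  | nil => rfl
  | cons x l ih => simp [sufAux, ih]

theorem accXor_append (c : Int) (l1 l2 : List Int) :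
    accXor c (l1 ++ l2) = accXor c l1 ++ accXor (l1.foldl PySem.Int.bxor c) l2 := by
  induction l1 generalizing c with
  | nil => rfl
  | cons x l ih => simp [accXor, ih]

-- B's forward loop: state after the fold is (total xor, acc ++ suffix list)
theorem loopB (l : List Int) (s : Int) (acc : List Int) :
    l.foldl (fun (st : Int × List Int) x =>
        (PySem.Int.bxor st.1 x, st.2 ++ [st.1])) (s, acc)
      = (l.foldl PySem.Int.bxor s, acc ++ sufAux s l) := by
  induction l generalizing s acc with
  | nil => simp [sufAux]
  | cons x l ih => simp [sufAux, ih]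

-- A's backward loop: state after the fold is (xor over reverse, acc ++ accXor c data.reverse)
theorem loopA (data : List Int) (c : Int) (acc : List Int) :
    (PySem.List.pyRange ((data.length : Int) - 1) (-1) (-1)).foldl
      (fun (st : Int × List Int) i =>
        let f := PySem.Int.bxor st.1 (PySem.List.pyGetD data i 0)
        (f, st.2 ++ [f])) (c, acc)
      = (data.reverse.foldl PySem.Int.bxor c, acc ++ accXor c data.reverse) := by
  induction data using List.reverseRecOn generalizing c acc with
  | nil =>
    rw [PySem.List.pyRange_neg_one_eq_nil (by norm_num)]
    simp [accXor]
  | append_singleton xs x ih =>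
    have hlen : ((xs ++ [x]).length : Int) - 1 = (xs.length : Int) := by
      simp
    rw [hlen, PySem.List.pyRange_neg_one_cons (by omega)]
    simp only [List.foldl_cons]
    have hget : PySem.List.pyGetD (xs ++ [x]) (xs.length : Int) 0 = x := by
      rw [PySem.List.pyGetD_eq_getElem (xs ++ [x]) 0 (by omega) (by simp)]
      simp
    rw [PySem.List.foldl_congr_mem _ _
      (fun (st : Int × List Int) i =>
        let f := PySem.Int.bxor st.1 (PySem.List.pyGetD xs i 0)
        (f, st.2 ++ [f])) _
      (by
        intro st i hi
        rw [PySem.List.mem_pyRange_neg_one] at hi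
        have h0 : (0 : Int) ≤ i := by omega
        have h1 : i < (xs.length : Int) := by omega
        have h2 : i < ((xs ++ [x]).length : Int) := by simp; omega
        simp only
        rw [PySem.List.pyGetD_eq_getElem (xs ++ [x]) 0 h0 h2, PySem.List.pyGetD_eq_getElem xs 0 h0 h1]
        have hel : (xs ++ [x])[i.toNat]'(by simp; omega) = xs[i.toNat]'(by omega) :=
          List.getElem_append_left (by omega)
        rw [hel])]
    simp only [hget]
    rw [ih]
    simp [accXor]

-- the bridge: A's reversed accumulation list = B's suffix list with each element xored with c
theorem accXor_reverse_eq (data : List Int) (c : Int) :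
    (accXor c data.reverse).reverse
      = (sufAux (data.foldl PySem.Int.bxor 0) data).map (fun s => PySem.Int.bxor c s) := by
  induction data generalizing c with
  | nil => rfl
  | cons x xs ih =>
    have hrev : (x :: xs).reverse = xs.reverse ++ [x] := by simp
    have hfoldrev : xs.reverse.foldl PySem.Int.bxor c
        = PySem.Int.bxor c (xs.foldl PySem.Int.bxor 0) := by
      rw [foldl_bxor_zero, foldl_bxor_reverse]
    have htot : (x :: xs).foldl PySem.Int.bxor 0
        = PySem.Int.bxor (xs.foldl PySem.Int.bxor 0) x := by
      simp only [List.foldl_cons]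
      rw [foldl_bxor_zero xs (PySem.Int.bxor 0 x), PySem.Int.bxor_comm 0 x,
        PySem.Int.bxor_zero, PySem.Int.bxor_comm]
    rw [hrev, accXor_append, htot]
    simp only [accXor, List.reverse_append, List.reverse_cons, List.reverse_nil,
      List.nil_append, List.singleton_append, sufAux, List.map_cons, bxor_cancel]
    refine congrArg₂ List.cons ?_ (ih c)
    rw [hfoldrev, bxor_assoc]

-- ===== VERDICT (by name: the statement is the Claim_ definition above) =====
theorem decode3_spec : Claim_equal_decode3 := by
  intro data _
  unfold Spec_decode3 decode3 decode3_alt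
  simp only [loopA, loopB, List.nil_append]
  rw [accXor_reverse_eq]
  refine List.map_congr_left ?_
  intro i hi
  rw [PySem.List.mem_pyRange_one] at hi
  obtain ⟨h0, hn⟩ := hi
  have hnpos : (0 : Int) < (data.length : Int) := by omega
  have hm0 : 0 ≤ PySem.Int.mod (i + 1) (data.length : Int) := PySem.Int.mod_nonneg _ hnpos
  have hmlt : PySem.Int.mod (i + 1) (data.length : Int) < (data.length : Int) :=
    PySem.Int.mod_lt _ hnpos
  have hlen : ((sufAux (data.foldl PySem.Int.bxor 0) data).map
      (fun s => PySem.Int.bxor 125 s)).length = data.length := by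
    simp [sufAux_length]
  rw [PySem.List.pyGetD_eq_getElem _ 0 hm0 (by rw [hlen]; exact_mod_cast hmlt),
    PySem.List.pyGetD_eq_getElem _ 0 hm0 (by rw [sufAux_length]; exact_mod_cast hmlt)]
  rw [List.getElem_map]
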